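-- pv_equiv track=rewrite | github.com/whaozhu/motivic_hilbert | calculate_hilbert.py | calculate_cardinality_syzygy
-- ===== SOURCE A (Python) =====
-- def delta_min(delta, gamma):
--     """
--     Generates a list of elements from delta that do not have a residual in gamma when subtracted from any element in delta_min.
--
--     Parameters:
--     delta (list): The list of elements to process.
--     gamma (list): The list of residuals to check against.
--
--     Returns:
--     list: A new list containing elements from delta that meet the criteria.
--     """
--     delta_min = []
--     for i in range(len(delta)):
--         d = delta[i]
--         if i == 0:
--             delta_min.append(d)
--         else:
--             for j in range(len(delta_min)):
--                 residual = d - delta_min[j]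
--                 if residual in gamma:
--                     break
--             if residual not in gamma:
--                 delta_min.append(d)
--     return delta_min
--
-- def generate_delta(delta_0, delete, gamma):
--     """
--     Generates a filtered list from delta_0 by removing a specified element and then processes it to generate delta_min.
--
--     Parameters:
--     delta_0 (list): The initial list of elements.
--     delete (any): The element to remove from the list.
--     gamma (list): The list of residuals to check against.
--
--     Returns:
--     tuple: A tuple containing the delta_min list and the filtered delta_pre list.
--     """
--     delta_pre = [x for x in delta_0 if x != delete]
--     return delta_min(delta_pre, gamma), delta_pre
--
-- def calculate_cardinality_syzygy(delta, gamma, gamma_index, syz_delta):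
--     """
--     Calculates the cardinality of the syzygy delta.
--
--     Parameters:
--     delta (list): The list of elements to process.
--     gamma (list): The list of residuals to check against.
--     gamma_index (int): The index of the gamma element to check.
--     syz_delta (list): The syzygy delta list.
--
--     Returns:
--     int: The cardinality of the syzygy delta.
--     """
--     delta_min_gen, _ = generate_delta(delta, None, gamma)
--     cardinality = 0
--     for d in delta_min_gen:
--         if d < gamma_index:
--             cardinality += 1
--
--     syz_delta_min_gen, _ = generate_delta(syz_delta, None, gamma)
--     cardinality_syzygy = 0
--     for syz_mg in syz_delta_min_gen:
--         for d in delta_min_gen: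
--             if (gamma_index - syz_mg + d) in gamma:
--                 if syz_mg < gamma_index:
--                     cardinality_syzygy += 1
--                     break
--     return cardinality - cardinality_syzygy
-- ===== SOURCE B (Python) =====
-- def _minimal(xs, gamma):
--     """Greedy minimal generators: keep x iff no previously kept m has x - m in gamma."""
--     gset = set(gamma)
--     kept = []
--     for x in xs:
--         if all(x - m not in gset for m in kept):
--             kept.append(x)
--     return kept
--
-- def calculate_cardinality_syzygy(delta, gamma, gamma_index, syz_delta):
--     dmin = _minimal(delta, gamma)
--     cardinality = sum(1 for d in dmin if d < gamma_index)
--     # syz_mg qualifies iff some d in dmin has gamma_index - syz_mg + d in gamma,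
--     # i.e. syz_mg is in the translated table T; a single membership pass replaces
--     # the nested scan-with-break.
--     T = {gamma_index + d - g for d in dmin for g in gamma}
--     smin = _minimal(syz_delta, gamma)
--     cardinality_syzygy = sum(1 for s in smin if s < gamma_index and s in T)
--     return cardinality - cardinality_syzygy
-- ===== Notes on version B (the rewrite author's own statement) =====
-- stated objective: alternative
-- what changed: The minimal-generator filter becomes a fold with an all() membership test against a set instead of the indexed scan with break and leftover 'residual' variable, and the nested syzygy scan-with-break is replaced by precomputing the translated table T = {gamma_index + d - g} once and counting qualifying syzygy generators in a single membership pass.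
import Mathlib
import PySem

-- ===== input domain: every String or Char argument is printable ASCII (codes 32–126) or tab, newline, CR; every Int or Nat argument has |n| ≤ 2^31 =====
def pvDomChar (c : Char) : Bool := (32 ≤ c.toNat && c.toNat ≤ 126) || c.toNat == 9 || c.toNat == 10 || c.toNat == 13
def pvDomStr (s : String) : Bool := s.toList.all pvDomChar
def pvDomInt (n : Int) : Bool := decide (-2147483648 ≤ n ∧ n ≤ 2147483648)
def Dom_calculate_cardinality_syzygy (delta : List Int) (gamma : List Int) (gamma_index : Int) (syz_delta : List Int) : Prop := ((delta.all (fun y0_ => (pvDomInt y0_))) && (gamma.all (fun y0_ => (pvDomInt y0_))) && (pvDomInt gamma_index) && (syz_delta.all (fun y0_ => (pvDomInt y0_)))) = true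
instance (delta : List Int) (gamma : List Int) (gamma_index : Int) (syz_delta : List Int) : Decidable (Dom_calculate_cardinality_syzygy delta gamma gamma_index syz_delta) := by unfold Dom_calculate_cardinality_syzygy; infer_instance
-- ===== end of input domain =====

-- B rewrites the minimal-generator filter as a fold with an all()-test and replaces the
-- nested syzygy scan-with-break by a precomputed translated table and one membership pass
-- (alternative decomposition; similar cost).


-- ===== PORT A =====
-- Inner loop of delta_min: residual = d - delta_min[j]; break when residual in gamma;
-- after the loop the Python variable `residual` holds the last value computed (the initial
-- accumulator r is never returned for the nonempty lists this is called on).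
def pyResidual (d : Int) (gamma : List Int) (r : Int) : List Int → Int
  | [] => r
  | m :: rest => if (d - m) ∈ gamma then d - m else pyResidual d gamma (d - m) rest

-- one iteration of delta_min's outer loop; the i == 0 branch is exactly the
-- accumulator-empty case (the first element is always appended, so the accumulator is
-- nonempty for every i > 0)
def pyDeltaMinStep (gamma : List Int) (dm : List Int) (d : Int) : List Int :=
  match dm with
  | [] => [d]                                   -- i == 0: append unconditionally
  | m :: rest =>
    let residual := pyResidual d gamma 0 (m :: rest)
    if residual ∈ gamma then m :: rest else (m :: rest) ++ [d]

def pyDeltaMin (delta gamma : List Int) : List Int :=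
  delta.foldl (pyDeltaMinStep gamma) []

-- generate_delta: delta_pre = [x for x in delta_0 if x != None]; an int never equals None.
def pyGenerateDelta (delta0 gamma : List Int) : List Int × List Int :=
  let delta_pre := delta0.filter (fun _x => true)
  (pyDeltaMin delta_pre gamma, delta_pre)

-- inner syzygy loop: contribution of one syz_mg (the break only fires when syz_mg < gamma_index)
def pySyzInner (gamma : List Int) (gamma_index s : Int) : List Int → Int
  | [] => 0
  | d :: rest =>
    if (gamma_index - s + d) ∈ gamma then
      (if s < gamma_index then 1 else pySyzInner gamma gamma_index s rest)
    else pySyzInner gamma gamma_index s rest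

def calculate_cardinality_syzygy (delta : List Int) (gamma : List Int) (gamma_index : Int) (syz_delta : List Int) : Int :=
  let delta_min_gen := (pyGenerateDelta delta gamma).1
  let cardinality := delta_min_gen.foldl (fun c d => if d < gamma_index then c + 1 else c) 0
  let syz_delta_min_gen := (pyGenerateDelta syz_delta gamma).1
  let cardinality_syzygy :=
    syz_delta_min_gen.foldl (fun c s => c + pySyzInner gamma gamma_index s delta_min_gen) 0
  cardinality - cardinality_syzygy

-- ===== PORT B =====
-- body of B's _minimal loop: keep x iff no previously kept m has x - m in gamma
def altMinStep (gset : PySem.Set Int) (kept : List Int) (x : Int) : List Int :=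
  if kept.all (fun m => !(gset.contains (x - m))) then kept ++ [x] else kept

def altMinimal (xs gamma : List Int) : List Int :=
  xs.foldl (altMinStep (PySem.Set.ofList gamma)) []

def calculate_cardinality_syzygy_alt (delta : List Int) (gamma : List Int) (gamma_index : Int) (syz_delta : List Int) : Int :=
  let dmin := altMinimal delta gamma
  let cardinality : Int := dmin.countP (fun d => decide (d < gamma_index))
  let T := PySem.Set.ofList (dmin.flatMap (fun d => gamma.map (fun g => gamma_index + d - g)))
  let smin := altMinimal syz_delta gamma
  let cardinality_syzygy : Int :=
    smin.countP (fun s => decide (s < gamma_index) && T.contains s)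
  cardinality - cardinality_syzygy

-- ===== PRECONDITION & SPEC =====
def Spec_calculate_cardinality_syzygy (delta : List Int) (gamma : List Int) (gamma_index : Int) (syz_delta : List Int) (out : Int) : Prop := out = calculate_cardinality_syzygy_alt delta gamma gamma_index syz_delta
instance (delta : List Int) (gamma : List Int) (gamma_index : Int) (syz_delta : List Int) (out : Int) : Decidable (Spec_calculate_cardinality_syzygy delta gamma gamma_index syz_delta out) := by unfold Spec_calculate_cardinality_syzygy; infer_instance

-- ===== CLAIM (what is proved, stated in full; the proofs are below) =====
def Claim_equal_calculate_cardinality_syzygy : Prop := ∀ (delta : List Int) (gamma : List Int) (gamma_index : Int) (syz_delta : List Int), Dom_calculate_cardinality_syzygy delta gamma gamma_index syz_delta → Spec_calculate_cardinality_syzygy delta gamma gamma_index syz_delta (calculate_cardinality_syzygy delta gamma gamma_index syz_delta)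

-- ===== LEMMAS AND PROOFS =====

-- the leftover-residual test of A's inner loop says exactly "some kept x has d - x in gamma"
lemma pyResidual_mem_iff (d : Int) (gamma : List Int) (r m : Int) (rest : List Int) :
    pyResidual d gamma r (m :: rest) ∈ gamma ↔ ∃ x ∈ m :: rest, (d - x) ∈ gamma := by
  induction rest generalizing r m with
  | nil => by_cases h : (d - m) ∈ gamma <;> simp [pyResidual, h]
  | cons m2 rest ih =>
    have unfold1 : pyResidual d gamma r (m :: m2 :: rest)
        = if (d - m) ∈ gamma then d - m else pyResidual d gamma (d - m) (m2 :: rest) := rfl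
    rw [unfold1]
    by_cases h : (d - m) ∈ gamma
    · simp [h]
    · rw [if_neg h, ih]
      simp [h]

-- the two loop bodies agree on every accumulator
lemma step_eq (gamma : List Int) (dm : List Int) (d : Int) :
    pyDeltaMinStep gamma dm d = altMinStep (PySem.Set.ofList gamma) dm d := by
  cases dm with
  | nil => simp [pyDeltaMinStep, altMinStep]
  | cons m rest =>
    have hcond : ((m :: rest).all (fun x => !((PySem.Set.ofList gamma).contains (d - x))) = true)
        ↔ ¬ ∃ x ∈ m :: rest, (d - x) ∈ gamma := by
      simp [List.all_eq_true, PySem.Set.contains_iff, PySem.Set.mem_ofList]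
    by_cases h : ∃ x ∈ m :: rest, (d - x) ∈ gamma
    · rw [pyDeltaMinStep, altMinStep, if_pos ((pyResidual_mem_iff d gamma 0 m rest).mpr h),
          if_neg (by rw [hcond]; exact not_not_intro h)]
    · rw [pyDeltaMinStep, altMinStep, if_neg (fun hm => h ((pyResidual_mem_iff d gamma 0 m rest).mp hm)),
          if_pos (hcond.mpr h)]

-- hence the two greedy filters agree
lemma deltaMin_eq (xs gamma : List Int) : pyDeltaMin xs gamma = altMinimal xs gamma := by
  unfold pyDeltaMin altMinimal
  rw [funext (fun dm => funext (step_eq gamma dm))]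

-- counting foldl = countP
lemma foldl_count (gi : Int) (l : List Int) (n : Int) :
    l.foldl (fun c d => if d < gi then c + 1 else c) n = n + (l.countP (fun d => decide (d < gi)) : Int) := by
  induction l generalizing n with
  | nil => simp
  | cons d rest ih =>
    simp only [List.foldl_cons, List.countP_cons]
    by_cases h : d < gi <;> simp [h, ih] <;> push_cast <;> ring

-- A's inner syzygy loop is the 0/1 indicator of "s below gamma_index and some d translates into gamma"
lemma syzInner_eq (gamma : List Int) (gi s : Int) (dm : List Int) :
    pySyzInner gamma gi s dm = if (s < gi ∧ ∃ d ∈ dm, (gi - s + d) ∈ gamma) then 1 else 0 := by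
  induction dm with
  | nil => simp [pySyzInner]
  | cons d rest ih =>
    by_cases h1 : (gi - s + d) ∈ gamma
    · by_cases h2 : s < gi
      · simp [pySyzInner, h1, h2]
      · simp [pySyzInner, h1, h2, ih]
    · simp [pySyzInner, h1, ih]

-- the syzygy counting foldl = countP against the translated table
lemma foldl_syz (gamma : List Int) (gi : Int) (dm smin : List Int) (n : Int) :
    smin.foldl (fun c s => c + pySyzInner gamma gi s dm) n =
      n + (smin.countP (fun s => decide (s < gi) &&
        (PySem.Set.ofList (dm.flatMap (fun d => gamma.map (fun g => gi + d - g)))).contains s) : Int) := by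
  induction smin generalizing n with
  | nil => simp
  | cons s rest ih =>
    have hmem : ((PySem.Set.ofList (dm.flatMap (fun d => gamma.map (fun g => gi + d - g)))).contains s = true)
        ↔ ∃ d ∈ dm, (gi - s + d) ∈ gamma := by
      simp only [PySem.Set.contains_iff, PySem.Set.mem_ofList, List.mem_flatMap, List.mem_map]
      constructor
      · rintro ⟨d, hd, g, hg, hs⟩
        refine ⟨d, hd, ?_⟩
        have : gi - s + d = g := by omega
        rw [this]; exact hg
      · rintro ⟨d, hd, hg⟩
        exact ⟨d, hd, gi - s + d, hg, by omega⟩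
    have hp : (decide (s < gi) && (PySem.Set.ofList (dm.flatMap (fun d => gamma.map (fun g => gi + d - g)))).contains s) = true
        ↔ (s < gi ∧ ∃ d ∈ dm, (gi - s + d) ∈ gamma) := by
      rw [Bool.and_eq_true, decide_eq_true_eq, hmem]
    simp only [List.foldl_cons]
    rw [ih, syzInner_eq, List.countP_cons]
    by_cases hc : s < gi ∧ ∃ d ∈ dm, (gi - s + d) ∈ gamma
    · rw [if_pos hc, if_pos (hp.mpr hc)]; push_cast; ring
    · rw [if_neg hc, if_neg (fun h => hc (hp.mp h))]; push_cast; ring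

-- ===== VERDICT (by name: the statement is the Claim_ definition above) =====
theorem calculate_cardinality_syzygy_spec : Claim_equal_calculate_cardinality_syzygy := by
  intro delta gamma gi syz _
  unfold Spec_calculate_cardinality_syzygy
  unfold calculate_cardinality_syzygy calculate_cardinality_syzygy_alt pyGenerateDelta
  simp only [List.filter_true, deltaMin_eq, foldl_count, foldl_syz, zero_add]
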